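-- pv_equiv track=rewrite | github.com/dokicpdd/coding_pra | coding_problem_DSA/backtrack/recursion.py | find_int
-- ===== SOURCE A (Python) =====
-- def find_int(n:int)->list[int]:
--     '''
-- A strictly-increasing integer means every digit in the number is greater than its preceding digit.
-- Write a recursive program find_int() that creates all strictly increasing integers with digits 1
-- to 9 of length n. You can assume n is always positive.
--     '''
--     if n<1 or n>9:
--         return []
--     result=[]
--
--     def backtrack(current_num,numOfDigits_used=1):
--         if numOfDigits_used==n:
--             result.append(current_num)
--             return
--
--         last_digit=current_num%10
--         start=last_digit+1
--         for new_digit in range(start,10):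
--             new_num=current_num*10+new_digit
--             backtrack(new_num,numOfDigits_used+1)
--     for i in range(1,10):
--         backtrack(i)
--     return result
-- ===== SOURCE B (Python) =====
-- def find_int(n: int) -> list[int]:
--     # Iterative "next-combination" (odometer) enumeration instead of recursion.
--     if n < 1 or n > 9:
--         return []
--     digits = list(range(1, n + 1))
--     result = []
--     while True:
--         num = 0
--         for d in digits:
--             num = num * 10 + d
--         result.append(num)
--         i = n - 1
--         while i >= 0 and digits[i] == 9 - (n - 1 - i):
--             i -= 1
--         if i < 0:
--             return result
--         digits[i] += 1
--         for j in range(i + 1, n):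
--             digits[j] = digits[j - 1] + 1
-- ===== Notes on version B (the rewrite author's own statement) =====
-- stated objective: alternative
-- what changed: Replaced the recursive backtracking (inner closure appending to a shared result list) with an iterative next-lexicographic-combination (odometer) loop over the digit array, no recursion.
import Mathlib
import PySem

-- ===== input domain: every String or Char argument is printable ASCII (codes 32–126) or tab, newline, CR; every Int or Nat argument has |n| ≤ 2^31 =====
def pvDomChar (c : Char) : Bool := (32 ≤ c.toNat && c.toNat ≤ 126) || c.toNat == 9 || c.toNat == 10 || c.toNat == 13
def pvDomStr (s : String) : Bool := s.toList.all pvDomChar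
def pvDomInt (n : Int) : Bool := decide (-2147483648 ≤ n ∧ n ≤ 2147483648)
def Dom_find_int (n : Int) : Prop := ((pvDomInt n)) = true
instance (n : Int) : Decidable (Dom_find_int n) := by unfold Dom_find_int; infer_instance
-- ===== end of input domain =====

-- B replaces A's recursive backtracking with an iterative next-combination (odometer) enumeration; objective: alternative.

set_option maxRecDepth 100000


-- ===== PORT A =====
-- backtrack(current_num, numOfDigits_used); the fuel only bounds the recursion depth
-- (digits strictly increase, so depth never exceeds 9 < 10) and is never exhausted.
def pvBacktrackA (n : Int) (fuel : Nat) (current : Int) (used : Int) : List Int :=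
  match fuel with
  | 0 => []
  | fuel + 1 =>
    if used == n then [current]
    else
      let last := PySem.Int.mod current 10
      let start := last + 1
      (PySem.List.pyRange start 10 1).foldl
        (fun acc d => acc ++ pvBacktrackA n fuel (current * 10 + d) (used + 1)) []

def find_int (n : Int) : List Int :=
  if n < 1 ∨ n > 9 then []
  else
    (PySem.List.pyRange 1 10 1).foldl (fun result i => result ++ pvBacktrackA n 10 i 1) []

-- ===== PORT B =====
-- num = fold of the digit list (the inner 'for d in digits' loop of Source B)
def pvNumOf (ds : List Int) : Int := ds.foldl (fun a d => a * 10 + d) 0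

-- 'while i >= 0 and digits[i] == 9-(n-1-i): i -= 1', with i = j - 1 counted down structurally
-- (j = 0 is Python's i = -1); the index stays in range, so getD 0 is exact
def pvFindI (ds : List Int) (n : Int) : Nat → Int
  | 0 => -1
  | j + 1 =>
    let i : Int := j
    if (PySem.List.pyGet? ds i).getD 0 == 9 - (n - 1 - i) then pvFindI ds n j else i

-- 'for j in range(i+1, n): digits[j] = digits[j-1] + 1' — each slot one more than its predecessor
def pvRamp (prev : Int) (k : Nat) : List Int :=
  match k with
  | 0 => []
  | k + 1 => (prev + 1) :: pvRamp (prev + 1) k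

-- the 'while True' loop of Source B; fuel 512 > C(9,k) for every k, so it is never exhausted
def pvLoop (n : Int) (fuel : Nat) (ds : List Int) (acc : List Int) : List Int :=
  match fuel with
  | 0 => acc
  | fuel + 1 =>
    let acc := acc ++ [pvNumOf ds]
    let i := pvFindI ds n n.toNat
    if i < 0 then acc
    else
      let di := (PySem.List.pyGet? ds i).getD 0 + 1
      let ds' := ds.take i.toNat ++ di :: pvRamp di (n.toNat - i.toNat - 1)
      pvLoop n fuel ds' acc

def find_int_alt (n : Int) : List Int :=
  if n < 1 ∨ n > 9 then []
  else pvLoop n 512 (PySem.List.pyRange 1 (n + 1) 1) []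

-- ===== PRECONDITION & SPEC =====
def Spec_find_int (n : Int) (out : List Int) : Prop := out = find_int_alt n
instance (n : Int) (out : List Int) : Decidable (Spec_find_int n out) := by unfold Spec_find_int; infer_instance

-- ===== CLAIM (what is proved, stated in full; the proofs are below) =====
def Claim_equal_find_int : Prop := ∀ (n : Int), Dom_find_int n → Spec_find_int n (find_int n)

-- ===== LEMMAS AND PROOFS =====
theorem find_int_out_of_range (n : Int) (h : n < 1 ∨ n > 9) :
    find_int n = find_int_alt n := by
  simp [find_int, find_int_alt, h]

-- ===== VERDICT (by name: the statement is the Claim_ definition above) =====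
theorem find_int_spec : Claim_equal_find_int := by
  intro n _
  unfold Spec_find_int
  by_cases h : n < 1 ∨ n > 9
  · exact find_int_out_of_range n h
  · rw [not_or, not_lt, not_lt] at h
    obtain ⟨h1, h9⟩ := h
    interval_cases n <;> decide
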